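-- pv_equiv track=rewrite | github.com/AdminRHS/Entities-dropbox-sync | LIBRARIES/LBS_003_Tools/fix_missing_names.py | get_category_from_data
-- ===== SOURCE A (Python) =====
-- def get_category_from_data(data):
--     """Extract readable category from tool data."""
--     category = data.get('category', '')
--
--     # Simplify categories
--     if 'AI' in category or 'LLM' in category or 'llm' in category:
--         if 'Video' in category:
--             return 'AI Tools - Video'
--         elif 'Image' in category or 'Generation' in category:
--             return 'AI Tools - Image'
--         elif 'Audio' in category:
--             return 'AI Tools - Audio'
--         elif 'Code' in category or 'Development' in category:
--             return 'AI Tools - Code'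
--         else:
--             return 'AI Tools'
--
--     elif 'Cloud' in category:
--         return 'Cloud Infrastructure'
--     elif 'Database' in category or 'Storage' in category:
--         return 'Database'
--     elif 'Social' in category or 'Network' in category or 'Community' in category:
--         return 'Social Network'
--     elif 'Freelance' in category or 'Marketplace' in category:
--         return 'Freelance Platform'
--     elif 'Developer' in category or 'Development' in category or 'IDE' in category:
--         return 'Development Tools'
--     elif 'Web' in category or 'Scraping' in category or 'Crawl' in category:
--         return 'Web Services'
--     elif 'Data' in category or 'Analytics' in category:
--         return 'Data & Analytics'
--     elif 'Payment' in category: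
--         return 'Payment'
--     elif 'Security' in category or 'Authentication' in category or 'Auth' in category:
--         return 'Security'
--     elif 'Video' in category and 'AI' not in category:
--         return 'Video Platform'
--     elif 'Portfolio' in category or 'Creative' in category:
--         return 'Creative Portfolio'
--     elif 'Publishing' in category or 'Blogging' in category:
--         return 'Publishing Platform'
--     elif 'Integration' in category:
--         return 'Integration Tools'
--     elif category:
--         return category
--
--     # Infer from purpose or vendor
--     purpose = data.get('purpose', '').lower()
--     vendor = data.get('vendor', '').lower()
--
--     if any(word in purpose or word in vendor for word in ['ai', 'llm', 'language model']):
--         return 'AI Tools'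
--     elif any(word in purpose or word in vendor for word in ['social', 'network']):
--         return 'Social Network'
--     elif any(word in purpose or word in vendor for word in ['cloud', 'hosting']):
--         return 'Cloud Infrastructure'
--
--     return 'Other'
-- ===== SOURCE B (Python) =====
-- # B: two-phase match-set / priority-minimum selection instead of an ordered
-- # if/elif first-match cascade: collect ALL matching rule priorities, then pick
-- # the smallest; rule order during matching is irrelevant.
--
-- _AI_KEYS = {'Video': 0, 'Image': 1, 'Generation': 1, 'Audio': 2,
--             'Code': 3, 'Development': 3}
-- _AI_LABELS = ['AI Tools - Video', 'AI Tools - Image', 'AI Tools - Audio',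
--               'AI Tools - Code']
--
-- _MAIN_KEYS = {'Cloud': 0, 'Database': 1, 'Storage': 1,
--               'Social': 2, 'Network': 2, 'Community': 2,
--               'Freelance': 3, 'Marketplace': 3,
--               'Developer': 4, 'Development': 4, 'IDE': 4,
--               'Web': 5, 'Scraping': 5, 'Crawl': 5,
--               'Data': 6, 'Analytics': 6, 'Payment': 7,
--               'Security': 8, 'Authentication': 8, 'Auth': 8,
--               'Video': 9, 'Portfolio': 10, 'Creative': 10,
--               'Publishing': 11, 'Blogging': 11, 'Integration': 12}
-- _MAIN_LABELS = ['Cloud Infrastructure', 'Database', 'Social Network',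
--                 'Freelance Platform', 'Development Tools', 'Web Services',
--                 'Data & Analytics', 'Payment', 'Security', 'Video Platform',
--                 'Creative Portfolio', 'Publishing Platform', 'Integration Tools']
--
-- _PV_KEYS = {'ai': 0, 'llm': 0, 'language model': 0,
--             'social': 1, 'network': 1,
--             'cloud': 2, 'hosting': 2}
-- _PV_LABELS = ['AI Tools', 'Social Network', 'Cloud Infrastructure']
--
--
-- def get_category_from_data(data):
--     """Extract readable category from tool data (min-priority over matched rules)."""
--     category = data.get('category', '')
--
--     if 'AI' in category or 'LLM' in category or 'llm' in category:
--         hits = [p for k, p in _AI_KEYS.items() if k in category]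
--         return _AI_LABELS[min(hits)] if hits else 'AI Tools'
--
--     hits = [p for k, p in _MAIN_KEYS.items() if k in category]
--     if hits:
--         return _MAIN_LABELS[min(hits)]
--     if category:
--         return category
--
--     purpose = data.get('purpose', '').lower()
--     vendor = data.get('vendor', '').lower()
--     hits = [p for k, p in _PV_KEYS.items() if k in purpose or k in vendor]
--     return _PV_LABELS[min(hits)] if hits else 'Other'
-- ===== Notes on version B (the rewrite author's own statement) =====
-- stated objective: alternative
-- what changed: Instead of an ordered if/elif first-match cascade, B runs a two-phase selection: it collects the priorities of ALL matching keyword rules into a list and returns the label of the minimum priority (rule scan order becomes irrelevant); equivalence rests on the priority tables being sorted in the cascade's order.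
import Mathlib
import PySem

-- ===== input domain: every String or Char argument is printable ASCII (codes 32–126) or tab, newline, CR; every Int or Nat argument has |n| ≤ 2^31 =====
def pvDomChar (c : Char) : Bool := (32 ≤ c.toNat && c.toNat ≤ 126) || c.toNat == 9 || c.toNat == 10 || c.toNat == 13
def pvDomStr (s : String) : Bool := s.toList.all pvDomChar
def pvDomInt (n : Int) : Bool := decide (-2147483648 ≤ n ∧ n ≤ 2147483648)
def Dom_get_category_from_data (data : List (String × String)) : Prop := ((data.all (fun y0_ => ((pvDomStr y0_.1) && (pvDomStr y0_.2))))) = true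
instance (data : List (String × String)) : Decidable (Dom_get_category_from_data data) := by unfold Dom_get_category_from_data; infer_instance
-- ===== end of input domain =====

-- B replaces A's ordered if/elif first-match cascade by a two-phase selection: collect the
-- priorities of ALL matching keyword rules, then return the label of the minimum priority
-- (scan order irrelevant); an alternative decomposition of the same fixed-cost task.

-- ===== PORT A =====
def get_category_from_data (data : List (String × String)) : String :=
  let d := PySem.Dict.ofList data
  let category := d.getD "category" ""
  if PySem.Str.isIn "AI" category || PySem.Str.isIn "LLM" category || PySem.Str.isIn "llm" category then
    if PySem.Str.isIn "Video" category then "AI Tools - Video"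
    else if PySem.Str.isIn "Image" category || PySem.Str.isIn "Generation" category then "AI Tools - Image"
    else if PySem.Str.isIn "Audio" category then "AI Tools - Audio"
    else if PySem.Str.isIn "Code" category || PySem.Str.isIn "Development" category then "AI Tools - Code"
    else "AI Tools"
  else if PySem.Str.isIn "Cloud" category then "Cloud Infrastructure"
  else if PySem.Str.isIn "Database" category || PySem.Str.isIn "Storage" category then "Database"
  else if PySem.Str.isIn "Social" category || PySem.Str.isIn "Network" category || PySem.Str.isIn "Community" category then "Social Network"
  else if PySem.Str.isIn "Freelance" category || PySem.Str.isIn "Marketplace" category then "Freelance Platform"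
  else if PySem.Str.isIn "Developer" category || PySem.Str.isIn "Development" category || PySem.Str.isIn "IDE" category then "Development Tools"
  else if PySem.Str.isIn "Web" category || PySem.Str.isIn "Scraping" category || PySem.Str.isIn "Crawl" category then "Web Services"
  else if PySem.Str.isIn "Data" category || PySem.Str.isIn "Analytics" category then "Data & Analytics"
  else if PySem.Str.isIn "Payment" category then "Payment"
  else if PySem.Str.isIn "Security" category || PySem.Str.isIn "Authentication" category || PySem.Str.isIn "Auth" category then "Security"
  else if PySem.Str.isIn "Video" category && !(PySem.Str.isIn "AI" category) then "Video Platform"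
  else if PySem.Str.isIn "Portfolio" category || PySem.Str.isIn "Creative" category then "Creative Portfolio"
  else if PySem.Str.isIn "Publishing" category || PySem.Str.isIn "Blogging" category then "Publishing Platform"
  else if PySem.Str.isIn "Integration" category then "Integration Tools"
  else if category ≠ "" then category
  else
    let purpose := PySem.Str.lower (d.getD "purpose" "")
    let vendor := PySem.Str.lower (d.getD "vendor" "")
    if (["ai", "llm", "language model"].any (fun w => PySem.Str.isIn w purpose || PySem.Str.isIn w vendor)) then "AI Tools"
    else if (["social", "network"].any (fun w => PySem.Str.isIn w purpose || PySem.Str.isIn w vendor)) then "Social Network"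
    else if (["cloud", "hosting"].any (fun w => PySem.Str.isIn w purpose || PySem.Str.isIn w vendor)) then "Cloud Infrastructure"
    else "Other"

-- ===== PORT B =====
def pvAiKeys : List (String × Nat) :=
  [("Video", 0), ("Image", 1), ("Generation", 1), ("Audio", 2), ("Code", 3), ("Development", 3)]
def pvAiLabels : List String :=
  ["AI Tools - Video", "AI Tools - Image", "AI Tools - Audio", "AI Tools - Code"]

def pvMainKeys : List (String × Nat) :=
  [("Cloud", 0), ("Database", 1), ("Storage", 1),
   ("Social", 2), ("Network", 2), ("Community", 2),
   ("Freelance", 3), ("Marketplace", 3),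
   ("Developer", 4), ("Development", 4), ("IDE", 4),
   ("Web", 5), ("Scraping", 5), ("Crawl", 5),
   ("Data", 6), ("Analytics", 6), ("Payment", 7),
   ("Security", 8), ("Authentication", 8), ("Auth", 8),
   ("Video", 9), ("Portfolio", 10), ("Creative", 10),
   ("Publishing", 11), ("Blogging", 11), ("Integration", 12)]
def pvMainLabels : List String :=
  ["Cloud Infrastructure", "Database", "Social Network", "Freelance Platform",
   "Development Tools", "Web Services", "Data & Analytics", "Payment", "Security",
   "Video Platform", "Creative Portfolio", "Publishing Platform", "Integration Tools"]

def pvPvKeys : List (String × Nat) :=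
  [("ai", 0), ("llm", 0), ("language model", 0),
   ("social", 1), ("network", 1), ("cloud", 2), ("hosting", 2)]
def pvPvLabels : List String := ["AI Tools", "Social Network", "Cloud Infrastructure"]

-- [p for k, p in keys if pred(k)]
def pvHits (keys : List (String × Nat)) (pred : String → Bool) : List Nat :=
  keys.filterMap (fun kp => if pred kp.1 then some kp.2 else none)

-- labels[min(hits)] if hits else dflt
def pvPick (labels : List String) (hits : List Nat) (dflt : String) : String :=
  match PySem.List.min? hits (fun x => x) with
  | some m => (PySem.List.pyGet? labels (m : Int)).getD ""
  | none => dflt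

def get_category_from_data_alt (data : List (String × String)) : String :=
  let d := PySem.Dict.ofList data
  let category := d.getD "category" ""
  if PySem.Str.isIn "AI" category || PySem.Str.isIn "LLM" category || PySem.Str.isIn "llm" category then
    pvPick pvAiLabels (pvHits pvAiKeys (fun k => PySem.Str.isIn k category)) "AI Tools"
  else
    let mainHits := pvHits pvMainKeys (fun k => PySem.Str.isIn k category)
    if mainHits ≠ [] then pvPick pvMainLabels mainHits ""
    else if category ≠ "" then category
    else
      let purpose := PySem.Str.lower (d.getD "purpose" "")
      let vendor := PySem.Str.lower (d.getD "vendor" "")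
      pvPick pvPvLabels
        (pvHits pvPvKeys (fun k => PySem.Str.isIn k purpose || PySem.Str.isIn k vendor)) "Other"

-- ===== PRECONDITION & SPEC =====
def Spec_get_category_from_data (data : List (String × String)) (out : String) : Prop := out = get_category_from_data_alt data
instance (data : List (String × String)) (out : String) : Decidable (Spec_get_category_from_data data out) := by unfold Spec_get_category_from_data; infer_instance

-- ===== CLAIM =====
def Claim_equal_get_category_from_data : Prop := ∀ (data : List (String × String)), Dom_get_category_from_data data → Spec_get_category_from_data data (get_category_from_data data)

-- ===== LEMMAS AND PROOFS =====
-- A's cascade rendered over a key table: first matching key's label (proof-side helper).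
def pvCascade (labels : List String) (dflt : String) (pred : String → Bool) :
    List (String × Nat) → String
  | [] => dflt
  | (k, p) :: rest =>
      if pred k then (PySem.List.pyGet? labels (p : Int)).getD ""
      else pvCascade labels dflt pred rest

theorem pv_foldl_min_eq (x : Nat) (t : List Nat) (h : ∀ y ∈ t, x ≤ y) :
    t.foldl min x = x := by
  induction t with
  | nil => rfl
  | cons a t ih =>
    simp only [List.foldl_cons, Nat.min_eq_left (h a (by simp))]
    exact ih (fun y hy => h y (by simp [hy]))

theorem pvHits_ge (keys : List (String × Nat)) (pred : String → Bool) (p : Nat)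
    (h : ∀ kp ∈ keys, p ≤ kp.2) : ∀ y ∈ pvHits keys pred, p ≤ y := by
  intro y hy
  unfold pvHits at hy
  obtain ⟨kp, hmem, heq⟩ := List.mem_filterMap.mp hy
  by_cases hp : pred kp.1 = true
  · simp [hp] at heq; exact heq ▸ h kp hmem
  · simp [hp] at heq

theorem pvPick_sorted (labels : List String) (dflt : String) (pred : String → Bool) :
    ∀ (keys : List (String × Nat)), keys.Pairwise (fun a b => a.2 ≤ b.2) →
      pvPick labels (pvHits keys pred) dflt = pvCascade labels dflt pred keys := by
  intro keys hsort
  induction keys with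
  | nil => rfl
  | cons kp rest ih =>
    obtain ⟨k, p⟩ := kp
    rcases List.pairwise_cons.mp hsort with ⟨hle, hrest⟩
    by_cases hp : pred k = true
    · have hhits : pvHits ((k, p) :: rest) pred = p :: pvHits rest pred := by
        simp [pvHits, hp]
      rw [hhits]
      unfold pvPick
      rw [PySem.List.min?_id_cons,
        pv_foldl_min_eq p _ (pvHits_ge rest pred p (fun kp hm => hle kp hm))]
      simp [pvCascade, hp]
    · have hhits : pvHits ((k, p) :: rest) pred = pvHits rest pred := by
        simp [pvHits, hp]
      rw [hhits, ih hrest]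
      simp [pvCascade, hp]


theorem pvHits_ne_iff (keys : List (String × Nat)) (pred : String → Bool) :
    (pvHits keys pred ≠ []) ↔ (keys.any (fun kp => pred kp.1) = true) := by
  simp [pvHits, List.filterMap_eq_nil_iff, List.any_eq_true]

theorem pvCascade_of_none (labels : List String) (dflt : String) (pred : String → Bool) :
    ∀ keys, keys.any (fun kp => pred kp.1) = false → pvCascade labels dflt pred keys = dflt := by
  intro keys h
  induction keys with
  | nil => rfl
  | cons kp rest ih =>
    obtain ⟨k, p⟩ := kp
    simp only [List.any_cons, Bool.or_eq_false_iff] at h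
    simp [pvCascade, h.1, ih h.2]

theorem pvCascade_dflt (labels : List String) (d1 d2 : String) (pred : String → Bool) :
    ∀ keys, keys.any (fun kp => pred kp.1) = true →
      pvCascade labels d1 pred keys = pvCascade labels d2 pred keys := by
  intro keys h
  induction keys with
  | nil => simp at h
  | cons kp rest ih =>
    obtain ⟨k, p⟩ := kp
    by_cases hp : pred k = true
    · simp [pvCascade, hp]
    · simp only [List.any_cons, hp, Bool.false_or] at h
      simp [pvCascade, hp, ih h]

theorem pv_stage (keys : List (String × Nat)) (labels : List String)
    (hsort : keys.Pairwise (fun a b => a.2 ≤ b.2)) (pred : String → Bool) (tail : String) :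
    (if pvHits keys pred ≠ [] then pvPick labels (pvHits keys pred) "" else tail)
      = pvCascade labels tail pred keys := by
  by_cases hAny : keys.any (fun kp => pred kp.1) = true
  · rw [if_pos ((pvHits_ne_iff keys pred).mpr hAny), pvPick_sorted labels "" pred keys hsort,
      pvCascade_dflt labels "" tail pred keys hAny]
  · rw [if_neg (by simpa using (pvHits_ne_iff keys pred).not.mpr (by simpa using hAny)),
      pvCascade_of_none labels tail pred keys (by simpa using hAny)]

theorem pv_if_or (a b : Bool) (x y : String) :
    (if a then x else if b then x else y) = if (a || b) then x else y := by
  cases a <;> simp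

theorem pv_or_eq_false_left {a b : Bool} (h : (a || b) = false) : a = false := by
  cases a <;> simp_all

set_option maxHeartbeats 4000000 in
theorem get_category_core_eq (c p v : String) :
    (if PySem.Str.isIn "AI" c || PySem.Str.isIn "LLM" c || PySem.Str.isIn "llm" c then
      if PySem.Str.isIn "Video" c then "AI Tools - Video"
      else if PySem.Str.isIn "Image" c || PySem.Str.isIn "Generation" c then "AI Tools - Image"
      else if PySem.Str.isIn "Audio" c then "AI Tools - Audio"
      else if PySem.Str.isIn "Code" c || PySem.Str.isIn "Development" c then "AI Tools - Code"
      else "AI Tools"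
    else if PySem.Str.isIn "Cloud" c then "Cloud Infrastructure"
    else if PySem.Str.isIn "Database" c || PySem.Str.isIn "Storage" c then "Database"
    else if PySem.Str.isIn "Social" c || PySem.Str.isIn "Network" c || PySem.Str.isIn "Community" c then "Social Network"
    else if PySem.Str.isIn "Freelance" c || PySem.Str.isIn "Marketplace" c then "Freelance Platform"
    else if PySem.Str.isIn "Developer" c || PySem.Str.isIn "Development" c || PySem.Str.isIn "IDE" c then "Development Tools"
    else if PySem.Str.isIn "Web" c || PySem.Str.isIn "Scraping" c || PySem.Str.isIn "Crawl" c then "Web Services"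
    else if PySem.Str.isIn "Data" c || PySem.Str.isIn "Analytics" c then "Data & Analytics"
    else if PySem.Str.isIn "Payment" c then "Payment"
    else if PySem.Str.isIn "Security" c || PySem.Str.isIn "Authentication" c || PySem.Str.isIn "Auth" c then "Security"
    else if PySem.Str.isIn "Video" c && !(PySem.Str.isIn "AI" c) then "Video Platform"
    else if PySem.Str.isIn "Portfolio" c || PySem.Str.isIn "Creative" c then "Creative Portfolio"
    else if PySem.Str.isIn "Publishing" c || PySem.Str.isIn "Blogging" c then "Publishing Platform"
    else if PySem.Str.isIn "Integration" c then "Integration Tools"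
    else if c ≠ "" then c
    else
      if (["ai", "llm", "language model"].any (fun w => PySem.Str.isIn w p || PySem.Str.isIn w v)) then "AI Tools"
      else if (["social", "network"].any (fun w => PySem.Str.isIn w p || PySem.Str.isIn w v)) then "Social Network"
      else if (["cloud", "hosting"].any (fun w => PySem.Str.isIn w p || PySem.Str.isIn w v)) then "Cloud Infrastructure"
      else "Other") =
    (if PySem.Str.isIn "AI" c || PySem.Str.isIn "LLM" c || PySem.Str.isIn "llm" c then
      pvPick pvAiLabels (pvHits pvAiKeys (fun k => PySem.Str.isIn k c)) "AI Tools"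
    else
      let mainHits := pvHits pvMainKeys (fun k => PySem.Str.isIn k c)
      if mainHits ≠ [] then pvPick pvMainLabels mainHits ""
      else if c ≠ "" then c
      else
        pvPick pvPvLabels
          (pvHits pvPvKeys (fun k => PySem.Str.isIn k p || PySem.Str.isIn k v)) "Other") := by
  by_cases hTop : (PySem.Str.isIn "AI" c || PySem.Str.isIn "LLM" c || PySem.Str.isIn "llm" c) = true
  · rw [if_pos hTop, if_pos hTop,
      pvPick_sorted pvAiLabels "AI Tools" (fun k => PySem.Str.isIn k c) pvAiKeys (by decide)]
    simp only [pvAiKeys, pvAiLabels, pvCascade, pv_if_or]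
    norm_num [PySem.List.pyGet?, PySem.List.pyIdx?]
    rfl
  · have hAI : PySem.Str.isIn "AI" c = false :=
      pv_or_eq_false_left (pv_or_eq_false_left (by simpa using hTop))
    rw [if_neg hTop, if_neg hTop]
    show _ = (if pvHits pvMainKeys _ ≠ [] then _ else _)
    rw [pv_stage pvMainKeys pvMainLabels (by decide) (fun k => PySem.Str.isIn k c) _,
      pvPick_sorted pvPvLabels "Other"
        (fun k => PySem.Str.isIn k p || PySem.Str.isIn k v) pvPvKeys (by decide)]
    simp only [pvMainKeys, pvMainLabels, pvPvKeys, pvPvLabels, pvCascade,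
      hAI, Bool.not_false, Bool.and_true, pv_if_or, List.any_cons, List.any_nil,
      Bool.or_false, Bool.or_assoc]
    norm_num [PySem.List.pyGet?, PySem.List.pyIdx?]
    rfl

-- ===== VERDICT =====
theorem get_category_from_data_spec : Claim_equal_get_category_from_data := by
  intro data _
  unfold Spec_get_category_from_data get_category_from_data get_category_from_data_alt
  exact get_category_core_eq _ _ _
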